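-- pv_equiv track=rewrite | github.com/jcbdelo26/chiefaiofficer-alpha-swarm | core/task_routing_policy.py | resolve_task_class
-- ===== SOURCE A (Python) =====
-- _TASK_CLASS_ALIASES = {
--     "hive_mind": {
--         "hive_mind",
--         "orchestration",
--         "planning",
--         "strategy",
--         "queen",
--         "decision",
--     },
--     "daily": {
--         "daily",
--         "email_creation",
--         "enrichment",
--         "research",
--         "copywriting",
--         "campaign_copy",
--     },
--     "deterministic_microtasks": {
--         "deterministic_microtasks",
--         "scheduler",
--         "scheduling",
--         "etc",
--         "microtask",
--         "fast_task",
--     },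
-- }
--
-- def resolve_task_class(task_name: str) -> str:
--     """
--     Resolve an arbitrary task name into one of the three route classes.
--     """
--     normalized = str(task_name or "").strip().lower()
--     if not normalized:
--         return "daily"
--     for task_class, aliases in _TASK_CLASS_ALIASES.items():
--         if normalized in aliases:
--             return task_class
--     return "daily"
-- ===== SOURCE B (Python) =====
-- # Binary search over one sorted (alias, class) table, instead of scanning alias sets.
-- _SORTED_ALIASES = [
--     ("campaign_copy", "daily"),
--     ("copywriting", "daily"),
--     ("daily", "daily"),
--     ("decision", "hive_mind"),
--     ("deterministic_microtasks", "deterministic_microtasks"),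
--     ("email_creation", "daily"),
--     ("enrichment", "daily"),
--     ("etc", "deterministic_microtasks"),
--     ("fast_task", "deterministic_microtasks"),
--     ("hive_mind", "hive_mind"),
--     ("microtask", "deterministic_microtasks"),
--     ("orchestration", "hive_mind"),
--     ("planning", "hive_mind"),
--     ("queen", "hive_mind"),
--     ("research", "daily"),
--     ("scheduler", "deterministic_microtasks"),
--     ("scheduling", "deterministic_microtasks"),
--     ("strategy", "hive_mind"),
-- ]
--
-- def _search(pairs, name):
--     if not pairs:
--         return "daily"
--     mid = len(pairs) // 2
--     key, task_class = pairs[mid]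
--     if name < key:
--         return _search(pairs[:mid], name)
--     if key < name:
--         return _search(pairs[mid + 1:], name)
--     return task_class
--
-- def resolve_task_class(task_name: str) -> str:
--     normalized = str(task_name or "").strip().lower()
--     return _search(_SORTED_ALIASES, normalized)
-- ===== Notes on version B (the rewrite author's own statement) =====
-- stated objective: alternative
-- what changed: The linear scan over three alias sets is replaced by a recursive binary search in one sorted flat (alias, class) table, returning the default class when the search exhausts the table (which also subsumes A's explicit empty-string guard).
import Mathlib
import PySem

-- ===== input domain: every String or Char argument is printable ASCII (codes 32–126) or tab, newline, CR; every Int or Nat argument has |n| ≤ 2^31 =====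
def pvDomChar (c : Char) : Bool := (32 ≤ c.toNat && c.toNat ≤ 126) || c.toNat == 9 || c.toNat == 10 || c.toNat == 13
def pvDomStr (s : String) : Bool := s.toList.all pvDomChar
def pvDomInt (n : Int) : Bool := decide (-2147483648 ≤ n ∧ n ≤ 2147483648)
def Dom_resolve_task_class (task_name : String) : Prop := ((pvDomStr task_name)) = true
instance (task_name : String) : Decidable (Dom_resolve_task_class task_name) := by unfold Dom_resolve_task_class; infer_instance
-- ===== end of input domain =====

-- B replaces A's loop over three alias sets by a recursive binary search in one sorted alias table (alternative algorithm).

-- ===== PORT A =====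
def pvAliases : List (String × List String) :=
  [("hive_mind", ["hive_mind", "orchestration", "planning", "strategy", "queen", "decision"]),
   ("daily", ["daily", "email_creation", "enrichment", "research", "copywriting", "campaign_copy"]),
   ("deterministic_microtasks", ["deterministic_microtasks", "scheduler", "scheduling", "etc", "microtask", "fast_task"])]

-- the for-loop of A: first class whose alias set contains the name, else "daily"
def pvLoopA : List (String × List String) → String → String
  | [], _ => "daily"
  | (cls, aliases) :: rest, n => if aliases.contains n then cls else pvLoopA rest n

def resolve_task_class (task_name : String) : String :=
  let normalized := PySem.Str.lower (PySem.Str.strip task_name)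
  if normalized = "" then "daily"
  else pvLoopA pvAliases normalized

-- ===== PORT B =====
def pvSorted : List (String × String) :=
  [("campaign_copy", "daily"),
   ("copywriting", "daily"),
   ("daily", "daily"),
   ("decision", "hive_mind"),
   ("deterministic_microtasks", "deterministic_microtasks"),
   ("email_creation", "daily"),
   ("enrichment", "daily"),
   ("etc", "deterministic_microtasks"),
   ("fast_task", "deterministic_microtasks"),
   ("hive_mind", "hive_mind"),
   ("microtask", "deterministic_microtasks"),
   ("orchestration", "hive_mind"),
   ("planning", "hive_mind"),
   ("queen", "hive_mind"),
   ("research", "daily"),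
   ("scheduler", "deterministic_microtasks"),
   ("scheduling", "deterministic_microtasks"),
   ("strategy", "hive_mind")]

-- Source B's _search: recursive binary search on the sorted pair list
def pvSearch (pairs : List (String × String)) (name : String) : String :=
  if pairs.isEmpty then "daily"
  else
    let mid := pairs.length / 2
    let p := pairs.getD mid ("", "daily")
    if name < p.1 then pvSearch (pairs.take mid) name
    else if p.1 < name then pvSearch (pairs.drop (mid + 1)) name
    else p.2
termination_by pairs.length
decreasing_by
  · have hne : pairs ≠ [] := by simpa [List.isEmpty_iff] using (by assumption : ¬ pairs.isEmpty = true)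
    have hpos : 0 < pairs.length := List.length_pos_iff.mpr hne
    simp only [List.length_take]
    omega
  · have hne : pairs ≠ [] := by simpa [List.isEmpty_iff] using (by assumption : ¬ pairs.isEmpty = true)
    have hpos : 0 < pairs.length := List.length_pos_iff.mpr hne
    simp only [List.length_drop]
    omega

def resolve_task_class_alt (task_name : String) : String :=
  let normalized := PySem.Str.lower (PySem.Str.strip task_name)
  pvSearch pvSorted normalized

-- ===== PRECONDITION & SPEC =====
def Spec_resolve_task_class (task_name : String) (out : String) : Prop := out = resolve_task_class_alt task_name
instance (task_name : String) (out : String) : Decidable (Spec_resolve_task_class task_name out) := by unfold Spec_resolve_task_class; infer_instance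

-- ===== CLAIM (what is proved, stated in full; the proofs are below) =====
def Claim_equal_resolve_task_class : Prop := ∀ (task_name : String), Dom_resolve_task_class task_name → Spec_resolve_task_class task_name (resolve_task_class task_name)

-- ===== LEMMAS AND PROOFS =====

-- binary search on a table containing no matching key returns the default
theorem pvSearch_notfound (pairs : List (String × String)) (name : String)
    (h : ∀ p ∈ pairs, p.1 ≠ name) : pvSearch pairs name = "daily" := by
  rw [pvSearch]
  by_cases he : pairs.isEmpty
  · simp [he]
  · have hne : pairs ≠ [] := by simpa [List.isEmpty_iff] using he
    have hpos : 0 < pairs.length := List.length_pos_iff.mpr hne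
    simp only [he, Bool.false_eq_true, if_false]
    by_cases c1 : name < (pairs.getD (pairs.length / 2) ("", "daily")).1
    · rw [if_pos c1]
      exact pvSearch_notfound (pairs.take (pairs.length / 2)) name
        (fun q hq => h q (List.mem_of_mem_take hq))
    · rw [if_neg c1]
      by_cases c2 : (pairs.getD (pairs.length / 2) ("", "daily")).1 < name
      · rw [if_pos c2]
        exact pvSearch_notfound (pairs.drop (pairs.length / 2 + 1)) name
          (fun q hq => h q (List.mem_of_mem_drop hq))
      · exfalso
        have hlen : pairs.length / 2 < pairs.length := by omega
        have hmem : pairs.getD (pairs.length / 2) ("", "daily") ∈ pairs := by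
          rw [List.getD_eq_getElem _ _ hlen]; exact List.getElem_mem _
        exact h _ hmem (le_antisymm (not_lt.mp c1) (not_lt.mp c2))
termination_by pairs.length
decreasing_by
  · simp only [List.length_take]; omega
  · simp only [List.length_drop]; omega

-- A's loop (with its empty guard) agrees with B's binary search for every name
theorem loop_eq_search (n : String) :
    (if n = "" then "daily" else pvLoopA pvAliases n) = pvSearch pvSorted n := by
  by_cases h0 : n = "hive_mind"
  · subst h0; simp [pvSearch, pvSorted, pvLoopA, pvAliases] <;> decide
  by_cases h1 : n = "orchestration"
  · subst h1; simp [pvSearch, pvSorted, pvLoopA, pvAliases] <;> decide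
  by_cases h2 : n = "planning"
  · subst h2; simp [pvSearch, pvSorted, pvLoopA, pvAliases] <;> decide
  by_cases h3 : n = "strategy"
  · subst h3; simp [pvSearch, pvSorted, pvLoopA, pvAliases] <;> decide
  by_cases h4 : n = "queen"
  · subst h4; simp [pvSearch, pvSorted, pvLoopA, pvAliases] <;> decide
  by_cases h5 : n = "decision"
  · subst h5; simp [pvSearch, pvSorted, pvLoopA, pvAliases] <;> decide
  by_cases h6 : n = "daily"
  · subst h6; simp [pvSearch, pvSorted, pvLoopA, pvAliases] <;> decide
  by_cases h7 : n = "email_creation"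
  · subst h7; simp [pvSearch, pvSorted, pvLoopA, pvAliases] <;> decide
  by_cases h8 : n = "enrichment"
  · subst h8; simp [pvSearch, pvSorted, pvLoopA, pvAliases] <;> decide
  by_cases h9 : n = "research"
  · subst h9; simp [pvSearch, pvSorted, pvLoopA, pvAliases] <;> decide
  by_cases h10 : n = "copywriting"
  · subst h10; simp [pvSearch, pvSorted, pvLoopA, pvAliases] <;> decide
  by_cases h11 : n = "campaign_copy"
  · subst h11; simp [pvSearch, pvSorted, pvLoopA, pvAliases] <;> decide
  by_cases h12 : n = "deterministic_microtasks"
  · subst h12; simp [pvSearch, pvSorted, pvLoopA, pvAliases] <;> decide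
  by_cases h13 : n = "scheduler"
  · subst h13; simp [pvSearch, pvSorted, pvLoopA, pvAliases] <;> decide
  by_cases h14 : n = "scheduling"
  · subst h14; simp [pvSearch, pvSorted, pvLoopA, pvAliases] <;> decide
  by_cases h15 : n = "etc"
  · subst h15; simp [pvSearch, pvSorted, pvLoopA, pvAliases] <;> decide
  by_cases h16 : n = "microtask"
  · subst h16; simp [pvSearch, pvSorted, pvLoopA, pvAliases] <;> decide
  by_cases h17 : n = "fast_task"
  · subst h17; simp [pvSearch, pvSorted, pvLoopA, pvAliases] <;> decide
  have hB : pvSearch pvSorted n = "daily" := by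
    apply pvSearch_notfound
    intro p hp
    simp only [pvSorted, List.mem_cons, List.not_mem_nil, or_false] at hp
    rcases hp with h|h|h|h|h|h|h|h|h|h|h|h|h|h|h|h|h|h <;>
      (subst h; intro e; exact absurd e.symm (by assumption))
  rw [hB]
  by_cases he : n = ""
  · simp [he]
  · simp [he, pvLoopA, pvAliases, h0, h1, h2, h3, h4, h5, h6, h7, h8, h9, h10, h11, h12, h13, h14, h15, h16, h17]

-- ===== VERDICT (by name: the statement is the Claim_ definition above) =====
theorem resolve_task_class_spec : Claim_equal_resolve_task_class := by
  intro task_name _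
  unfold Spec_resolve_task_class resolve_task_class resolve_task_class_alt
  exact loop_eq_search _
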